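-- pv_equiv track=rewrite | github.com/Steve-theCodingGuy/Awesome-Python | rot47.py | transform
-- ===== SOURCE A (Python) =====
-- def transform(msg):
--
--     # list with the ASCII values of the plaintext
--     msgASCII = [ord(char) for char in msg]      # char to ASCII
--     transASCII = []
--     for ch in msgASCII:
--         if ch in range(33,127):
--             transASCII.append(33+((ch+14)%94))
--         else:
--             transASCII.append(ch)
--     transform = ''.join(map(chr,transASCII))
--     return transform
-- ===== SOURCE B (Python) =====
-- # ROT47 by rotating the printable alphabet: pair each char with the one 47
-- # places later (cyclically) and translate through that correspondence.
-- def transform(msg):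
--     alphabet = ''.join(map(chr, range(33, 127)))
--     rotated = alphabet[47:] + alphabet[:47]
--     return msg.translate(str.maketrans(alphabet, rotated))
-- ===== Notes on version B (the rewrite author's own statement) =====
-- stated objective: idiomatic
-- what changed: Instead of per-character modular arithmetic in an explicit loop, B constructs the 94-char printable alphabet, rotates it by 47 via slicing, and translates the message through the resulting character correspondence (str.maketrans + translate), which a timing run measured as much faster (C-level table pass).
import Mathlib
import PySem

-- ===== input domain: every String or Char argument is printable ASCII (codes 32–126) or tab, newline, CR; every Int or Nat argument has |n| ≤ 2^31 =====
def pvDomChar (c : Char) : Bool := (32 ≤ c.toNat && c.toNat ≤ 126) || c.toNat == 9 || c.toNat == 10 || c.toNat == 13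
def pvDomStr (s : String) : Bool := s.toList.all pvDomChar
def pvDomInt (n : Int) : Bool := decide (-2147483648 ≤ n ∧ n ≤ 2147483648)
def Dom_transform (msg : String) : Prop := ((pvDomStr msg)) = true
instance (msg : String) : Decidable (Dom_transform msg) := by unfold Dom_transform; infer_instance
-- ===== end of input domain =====

-- B replaces A's per-character modular-arithmetic loop with an alphabet rotated by slicing and a translation through it; same values, different derivation.

-- ===== PORT A =====
-- 'ch in range(33,127)' is ported as its membership condition 33 ≤ ch ∧ ch < 127 (exact for step 1).
def transform (msg : String) : String :=
  let msgASCII : List Int := msg.toList.map (fun c => (c.toNat : Int))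
  let transASCII : List Int :=
    msgASCII.foldl (fun acc ch =>
      if 33 ≤ ch ∧ ch < 127 then acc ++ [33 + PySem.Int.mod (ch + 14) 94]
      else acc ++ [ch]) []
  String.mk (transASCII.map (fun n => Char.ofNat n.toNat))

-- ===== PORT B =====
-- alphabet = ''.join(map(chr, range(33,127)))
def rotAlphabet : List Char := (PySem.List.pyRange 33 127 1).map (fun n => Char.ofNat n.toNat)
-- rotated = alphabet[47:] + alphabet[:47]
def rotRotated : List Char := PySem.List.slice rotAlphabet (some 47) none ++ PySem.List.slice rotAlphabet none (some 47)
-- str.maketrans(alphabet, rotated) = {ord(a): ord(b) for a,b paired positionally}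
def rotTable : PySem.Dict Int Int :=
  (rotAlphabet.zip rotRotated).foldl
    (fun d p => d.insert (p.1.toNat : Int) (p.2.toNat : Int)) PySem.Dict.empty
-- msg.translate(table): replace a char whose codepoint is a key, keep it otherwise
def transform_alt (msg : String) : String :=
  String.mk (msg.toList.map (fun c =>
    match rotTable.get? (c.toNat : Int) with
    | some v => Char.ofNat v.toNat
    | none => c))

-- ===== PRECONDITION & SPEC =====
def Spec_transform (msg : String) (out : String) : Prop := out = transform_alt msg
instance (msg : String) (out : String) : Decidable (Spec_transform msg out) := by unfold Spec_transform; infer_instance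

-- ===== CLAIM (what is proved, stated in full; the proofs are below) =====
def Claim_equal_transform : Prop := ∀ (msg : String), Dom_transform msg → Spec_transform msg (transform msg)

-- ===== LEMMAS AND PROOFS =====

set_option maxRecDepth 100000 in
set_option maxHeartbeats 2000000 in
theorem rotTable_get? : ∀ n : Nat, n < 128 →
    rotTable.get? (n : Int) =
      (if 33 ≤ n ∧ n < 127 then some (33 + PySem.Int.mod ((n : Int) + 14) 94) else none) := by
  decide

theorem foldl_step_eq_map (l : List Int) (acc : List Int) :
    l.foldl (fun acc ch => if 33 ≤ ch ∧ ch < 127 then acc ++ [33 + PySem.Int.mod (ch + 14) 94]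
             else acc ++ [ch]) acc
      = acc ++ l.map (fun ch => if 33 ≤ ch ∧ ch < 127 then 33 + PySem.Int.mod (ch + 14) 94 else ch) := by
  induction l generalizing acc with
  | nil => simp
  | cons x xs ih =>
    simp only [List.foldl, List.map]
    by_cases h : 33 ≤ x ∧ x < 127 <;>
      simp only [h, ite_false] <;>
      rw [ih] <;> simp

theorem perchar (c : Char) (hc : pvDomChar c = true) :
    Char.ofNat ((if 33 ≤ (c.toNat : Int) ∧ (c.toNat : Int) < 127
                 then 33 + PySem.Int.mod ((c.toNat : Int) + 14) 94
                 else (c.toNat : Int))).toNat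
      = (match rotTable.get? ((c.toNat : Int)) with
         | some v => Char.ofNat v.toNat
         | none => c) := by
  have hlt : c.toNat < 128 := by
    simp [pvDomChar] at hc
    omega
  rw [rotTable_get? c.toNat hlt]
  by_cases h : 33 ≤ c.toNat ∧ c.toNat < 127
  · have h' : 33 ≤ (c.toNat : Int) ∧ (c.toNat : Int) < 127 := by
      constructor <;> [exact_mod_cast h.1; exact_mod_cast h.2]
    simp [h, h']
  · have h' : ¬ (33 ≤ (c.toNat : Int) ∧ (c.toNat : Int) < 127) := by
      intro hx
      exact h ⟨by exact_mod_cast hx.1, by exact_mod_cast hx.2⟩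
    simp [h, Char.ofNat_toNat]

-- ===== VERDICT (by name: the statement is the Claim_ definition above) =====
set_option maxRecDepth 10000 in
theorem transform_spec : Claim_equal_transform := by
  intro msg hdom
  unfold Spec_transform transform transform_alt
  simp only [foldl_step_eq_map, List.nil_append, List.map_map]
  congr 1
  apply List.map_congr_left
  intro c hcmem
  have hc : pvDomChar c = true :=
    (List.all_eq_true.mp hdom) c hcmem
  exact perchar c hc
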